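-- pv_equiv track=rewrite | github.com/study-room-for-dogyun/Baeckjoon | 우테코4기/Q4.py | solution
-- ===== SOURCE A (Python) =====
-- def solution(s):
--     answer = []
--
--     cnt = 1
--     for i in range(len(s) - 1):
--         if s[i] == s[i + 1]:
--             cnt += 1
--         else:
--             answer.append(cnt)
--             cnt = 1
--     answer.append(cnt)
--
--     if s[0] == s[-1]:
--         answer[0] += answer[-1]
--         answer = answer[:-1]
--
--     if not answer:
--         answer.append(len(s))
--
--     answer.sort()
--
--     return answer
-- ===== SOURCE B (Python) =====
-- def solution(s):
--     n = len(s)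
--     boundaries = [i for i in range(n) if s[i] != s[(i + 1) % n]]
--     if not boundaries:
--         return [n]
--     return sorted((boundaries[j] - boundaries[j - 1]) % n
--                   for j in range(len(boundaries)))
-- ===== Notes on version B (the rewrite author's own statement) =====
-- stated objective: alternative
-- what changed: B replaces A's incremental run counter with post-hoc wraparound merge by collecting the circular run-boundary indices in one comprehension and taking circular differences (mod n) of consecutive boundaries, so the wrap is handled implicitly.
import Mathlib
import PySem

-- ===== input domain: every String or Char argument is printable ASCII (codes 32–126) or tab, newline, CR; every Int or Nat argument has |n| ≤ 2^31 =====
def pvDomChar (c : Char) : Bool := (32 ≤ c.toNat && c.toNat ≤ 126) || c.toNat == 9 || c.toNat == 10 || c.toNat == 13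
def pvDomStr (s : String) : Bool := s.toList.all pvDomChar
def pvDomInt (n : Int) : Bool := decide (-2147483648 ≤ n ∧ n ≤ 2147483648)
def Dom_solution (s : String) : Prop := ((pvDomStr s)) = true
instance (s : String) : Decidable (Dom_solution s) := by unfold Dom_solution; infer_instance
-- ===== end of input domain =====

-- B builds the circular run-boundary index list and takes circular differences mod n of
-- consecutive boundaries, instead of A's incremental counter with an after-the-fact
-- wraparound merge (objective: alternative). Equivalence is proved for every non-empty
-- string; A raises IndexError on "".

-- ===== PORT A =====
def solutionCore (cs : List Char) : List Int :=
  let st := (PySem.List.pyRange 0 ((cs.length : Int) - 1) 1).foldl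
    (fun st i =>
      if PySem.List.pyGetD cs i ' ' == PySem.List.pyGetD cs (i + 1) ' '
      then (st.1, st.2 + 1)
      else (st.1 ++ [st.2], (1 : Int)))
    (([] : List Int), (1 : Int))
  let answer := st.1 ++ [st.2]
  let answer :=
    if PySem.List.pyGet? cs 0 == PySem.List.pyGet? cs (-1) then
      PySem.List.slice (PySem.List.pySetD answer 0
        (PySem.List.pyGetD answer 0 0 + PySem.List.pyGetD answer (-1) 0)) none (some (-1))
    else answer
  let answer := if answer = [] then answer ++ [(cs.length : Int)] else answer
  PySem.List.sorted answer (fun x => x) false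

def solution (s : String) : List Int := solutionCore s.toList

-- ===== PORT B =====
def solution_altCore (cs : List Char) : List Int :=
  let n : Int := cs.length
  let boundaries := (PySem.List.pyRange 0 n 1).filter
    (fun i => !(PySem.List.pyGetD cs i ' ' == PySem.List.pyGetD cs (PySem.Int.mod (i + 1) n) ' '))
  if boundaries = [] then [n]
  else PySem.List.sorted
    ((PySem.List.pyRange 0 (boundaries.length : Int) 1).map
      (fun j => PySem.Int.mod (PySem.List.pyGetD boundaries j 0 - PySem.List.pyGetD boundaries (j - 1) 0) n))
    (fun x => x) false

def solution_alt (s : String) : List Int := solution_altCore s.toList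

-- ===== PRECONDITION & SPEC =====
-- Pre_ excludes only the empty string, on which the Python A raises IndexError at s[0].
def Pre_solution (s : String) : Prop := s ≠ ""
instance (s : String) : Decidable (Pre_solution s) := by unfold Pre_solution; infer_instance
def pvWitness_solution : String := "aab"

def Spec_solution (s : String) (out : List Int) : Prop := out = solution_alt s
instance (s : String) (out : List Int) : Decidable (Spec_solution s out) := by unfold Spec_solution; infer_instance

-- ===== CLAIM (what is proved, stated in full; the proofs are below) =====
def Claim_equal_solution : Prop := ∀ (s : String), Dom_solution s → Pre_solution s → Spec_solution s (solution s)

-- ===== LEMMAS AND PROOFS =====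

-- char at i with Python default-get (proof helper)
def gchr (cs : List Char) (i : Int) : Char := PySem.List.pyGetD cs i ' '

-- linear boundary positions of A's scan
def lbdU (cs : List Char) (t : Int) : List Int :=
  (PySem.List.pyRange 0 t 1).filter (fun i => !(gchr cs i == gchr cs (i + 1)))

def lbd (cs : List Char) : List Int := lbdU cs ((cs.length : Int) - 1)

-- difference list: run lengths from boundary positions
def dfrom (prev : Int) : List Int → List Int
  | [] => []
  | b :: r => (b - prev) :: dfrom b r

theorem length_dfrom (prev : Int) (bs : List Int) : (dfrom prev bs).length = bs.length := by
  induction bs generalizing prev with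
  | nil => rfl
  | cons b r ih => simp [dfrom, ih]

theorem dfrom_append_singleton (prev t : Int) (bs : List Int) :
    dfrom prev (bs ++ [t]) = dfrom prev bs ++ [t - bs.getLast?.getD prev] := by
  induction bs generalizing prev with
  | nil => simp [dfrom]
  | cons b r ih =>
      simp only [List.cons_append, dfrom, ih, List.getLast?_cons]
      cases r <;> simp [dfrom]

theorem getElem_dfrom (prev : Int) (bs : List Int) (i : Nat) (h : i < bs.length) :
    (dfrom prev bs)[i]'(by rw [length_dfrom]; exact h)
      = bs.getD i 0 - (if i = 0 then prev else bs.getD (i - 1) 0) := by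
  induction bs generalizing prev i with
  | nil => simp at h
  | cons b r ih =>
      cases i with
      | zero => simp [dfrom]
      | succ j =>
          have hj : j < r.length := by simpa using h
          have := ih b j hj
          simp only [dfrom, List.getElem_cons_succ, this]
          cases j with
          | zero => simp
          | succ k => simp

theorem mem_lbdU (cs : List Char) (t i : Int) :
    i ∈ lbdU cs t ↔ (0 ≤ i ∧ i < t) ∧ ¬ gchr cs i = gchr cs (i + 1) := by
  simp [lbdU, List.mem_filter, PySem.List.mem_pyRange_one]

theorem pairwise_lbdU (cs : List Char) (t : Int) : (lbdU cs t).Pairwise (· < ·) :=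
  (PySem.List.pairwise_lt_pyRange_one 0 t).filter _

-- mod identities
theorem modId (a n : Int) (h0 : 0 ≤ a) (h1 : a < n) : PySem.Int.mod a n = a := by
  rw [PySem.Int.mod_eq_emod_of_pos (show (0:Int) < n by omega)]
  exact Int.emod_eq_of_lt h0 h1

theorem modNeg (a n : Int) (h0 : -n ≤ a) (h1 : a < 0) : PySem.Int.mod a n = a + n := by
  have hn : 0 < n := by omega
  rw [PySem.Int.mod_eq_emod_of_pos hn]
  have : a % n = (a + n) % n := (Int.add_emod_right a n).symm
  rw [this]
  exact Int.emod_eq_of_lt (by omega) (by omega)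

-- constancy on a boundary-free segment
theorem const_seg (cs : List Char) (d : Nat) (a : Int)
    (h : ∀ i : Int, a ≤ i → i < a + d → gchr cs i = gchr cs (i + 1)) :
    gchr cs a = gchr cs (a + d) := by
  induction d with
  | zero => simp
  | succ e ih =>
      have h1 : gchr cs a = gchr cs (a + e) := ih (fun i hi hi2 => h i hi (by push_cast at hi2 ⊢; omega))
      have h2 : gchr cs (a + e) = gchr cs (a + e + 1) := h (a + e) (by omega) (by push_cast; omega)
      rw [h1, h2, show a + (e:Int) + 1 = a + ((e+1:Nat):Int) by push_cast; ring]

theorem no_bdry (cs : List Char) (i : Int) (h0 : 0 ≤ i) (h1 : i < (cs.length : Int) - 1)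
    (hni : i ∉ lbd cs) : gchr cs i = gchr cs (i + 1) := by
  by_contra hne
  exact hni ((mem_lbdU cs _ i).2 ⟨⟨h0, h1⟩, hne⟩)

theorem const_between (cs : List Char) (a b : Int) (h0 : 0 ≤ a) (hab : a ≤ b)
    (hb : b ≤ (cs.length : Int) - 1) (hfree : ∀ i, a ≤ i → i < b → i ∉ lbd cs) :
    gchr cs a = gchr cs b := by
  have hcast : ((b - a).toNat : Int) = b - a := Int.toNat_of_nonneg (by omega)
  have := const_seg cs (b - a).toNat a (fun i hi hi2 => by
    rw [hcast] at hi2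
    exact no_bdry cs i (by omega) (by omega) (hfree i hi (by omega)))
  rwa [hcast, show a + (b - a) = b by ring] at this

theorem foldl_inv (cs : List Char) (t : Nat) :
    (PySem.List.pyRange 0 (t : Int) 1).foldl
      (fun st i =>
        if PySem.List.pyGetD cs i ' ' == PySem.List.pyGetD cs (i + 1) ' '
        then (st.1, st.2 + 1)
        else (st.1 ++ [st.2], (1 : Int)))
      (([] : List Int), (1 : Int))
    = (dfrom (-1) (lbdU cs (t : Int)), (t : Int) - ((lbdU cs (t : Int)).getLast?.getD (-1))) := by
  induction t with
  | zero => simp [lbdU, PySem.List.pyRange_one_eq_nil, dfrom]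
  | succ e ih =>
      have hc : ((e + 1 : Nat) : Int) = (e : Int) + 1 := by push_cast; ring
      rw [hc, PySem.List.pyRange_one_succ_right (by positivity), List.foldl_append, ih]
      unfold lbdU
      rw [PySem.List.pyRange_one_succ_right (by positivity), List.filter_append]
      by_cases hcc : gchr cs (e : Int) = gchr cs ((e : Int) + 1)
      · have : (List.filter (fun i => !(gchr cs i == gchr cs (i + 1))) [(e : Int)]) = [] := by
          simp [hcc]
        rw [this, List.append_nil]
        simp only [List.foldl_cons, List.foldl_nil]
        simp only [gchr] at hcc
        rw [beq_iff_eq.mpr hcc]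
        simp only [if_true]
        refine Prod.ext rfl ?_
        simp; ring
      · have : (List.filter (fun i => !(gchr cs i == gchr cs (i + 1))) [(e : Int)]) = [(e : Int)] := by
          simp [hcc]
        rw [this]
        simp only [List.foldl_cons, List.foldl_nil]
        simp only [gchr] at hcc
        rw [beq_eq_false_iff_ne.mpr hcc]
        simp only [Bool.false_eq_true, if_false]
        refine Prod.ext ?_ ?_
        · simp only [dfrom_append_singleton]
        · simp

theorem bnd_eq (cs : List Char) (h : cs ≠ []) :
    (PySem.List.pyRange 0 (cs.length : Int) 1).filter
      (fun i => !(PySem.List.pyGetD cs i ' ' == PySem.List.pyGetD cs (PySem.Int.mod (i + 1) (cs.length : Int)) ' '))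
    = lbd cs ++ (if gchr cs ((cs.length : Int) - 1) = gchr cs 0 then [] else [(cs.length : Int) - 1]) := by
  have hn : 1 ≤ (cs.length : Int) := by
    have := List.length_pos_of_ne_nil h; omega
  have hsplit : PySem.List.pyRange 0 (cs.length : Int) 1
      = PySem.List.pyRange 0 ((cs.length : Int) - 1) 1 ++ [(cs.length : Int) - 1] := by
    rw [PySem.List.pyRange_one_append 0 ((cs.length : Int) - 1) (cs.length : Int) (by omega) (by omega)]
    congr 1
    rw [PySem.List.pyRange_one_cons (by omega), PySem.List.pyRange_one_eq_nil (by omega)]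
  rw [hsplit, List.filter_append]
  congr 1
  · rw [lbd, lbdU]
    refine List.filter_congr ?_
    intro i hi
    rw [PySem.List.mem_pyRange_one] at hi
    rw [modId (i + 1) _ (by omega) (by omega)]
    rfl
  · have hm : PySem.Int.mod (((cs.length : Int) - 1) + 1) (cs.length : Int) = 0 := by
      rw [PySem.Int.mod_eq_emod_of_pos (by omega)]
      simp
    simp only [List.filter_cons, List.filter_nil, hm]
    by_cases hcc : gchr cs ((cs.length : Int) - 1) = gchr cs 0
    · rw [if_pos hcc]
      simp only [gchr] at hcc
      simp [hcc]
    · rw [if_neg hcc]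
      simp only [gchr] at hcc
      simp [hcc]

theorem gaps_eq (n : Int) (bs : List Int) (hlen : 2 ≤ bs.length)
    (hpw : bs.Pairwise (· < ·)) (hbnd : ∀ x ∈ bs, 0 ≤ x ∧ x < n) :
    (PySem.List.pyRange 0 (bs.length : Int) 1).map
      (fun j => PySem.Int.mod (PySem.List.pyGetD bs j 0 - PySem.List.pyGetD bs (j - 1) 0) n)
    = (bs.getD 0 0 + n - (bs.getLast?.getD 0)) :: dfrom (bs.getD 0 0) bs.tail := by
  obtain ⟨b0, r, rfl⟩ : ∃ b0 r, bs = b0 :: r := by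
    cases bs with
    | nil => simp at hlen
    | cons a l => exact ⟨a, l, rfl⟩
  have hne : b0 :: r ≠ [] := List.cons_ne_nil _ _
  have hrne : r ≠ [] := by
    intro h; rw [h] at hlen; simp at hlen
  have hglt : ∀ (p q : Nat) (hp : p < q) (hq : q < (b0 :: r).length),
      (b0 :: r)[p]'(by omega) < (b0 :: r)[q] :=
    fun p q hp hq => List.pairwise_iff_getElem.mp hpw p q (by omega) hq hp
  have hbd : ∀ (p : Nat) (hp : p < (b0 :: r).length), 0 ≤ (b0 :: r)[p] ∧ (b0 :: r)[p] < n :=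
    fun p hp => hbnd _ (List.getElem_mem hp)
  apply List.ext_getElem
  · simp [PySem.List.length_pyRange_one, length_dfrom]
  · intro i h1 h2
    have hi : i < (b0 :: r).length := by
      simpa [PySem.List.length_pyRange_one] using h1
    rw [List.getElem_map, PySem.List.getElem_pyRange_one]
    cases i with
    | zero =>
        simp only [Nat.cast_zero, zero_add, List.getElem_cons_zero]
        rw [show (0 : Int) - 1 = -1 by ring]
        rw [PySem.List.pyGetD_neg_ofNat (b0 :: r) 1 0 (by norm_num) (by simp),
          PySem.List.pyGetD_zero_cons, List.getLast?_eq_some_getLast hne]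
        simp only [Option.getD_some, List.getD_cons_zero]
        have hL : (b0 :: r).getLast hne = (b0 :: r)[(b0 :: r).length - 1]'(by omega) :=
          List.getLast_eq_getElem hne
        rw [hL]
        have hlt : (b0 :: r)[0] < (b0 :: r)[(b0 :: r).length - 1]'(by omega) :=
          hglt 0 ((b0 :: r).length - 1) (by have := List.length_pos_of_ne_nil hrne; simp; omega) (by omega)
        have hb1 := hbd 0 (by omega)
        have hb2 := hbd ((b0 :: r).length - 1) (by omega)
        simp only [List.getElem_cons_zero] at hlt hb1
        rw [modNeg _ _ (by omega) (by omega)]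
        ring
    | succ j =>
        have hj : j < r.length := by simpa using hi
        simp only [List.getElem_cons_succ, List.getD_cons_zero, List.tail_cons]
        rw [getElem_dfrom b0 r j hj]
        have hc1 : (0 : Int) + ((j + 1 : Nat) : Int) = ((j + 1 : Nat) : Int) := by ring
        have hc2 : ((j + 1 : Nat) : Int) - 1 = ((j : Nat) : Int) := by push_cast; ring
        rw [hc1, PySem.List.pyGetD_natCast, hc2, PySem.List.pyGetD_natCast]
        have hi' : j + 1 < (b0 :: r).length := hi
        have hv1 : (b0 :: r).getD (j + 1) 0 = (b0 :: r)[j + 1] := List.getD_eq_getElem _ _ hi'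
        have hv0 : (b0 :: r).getD j 0 = (b0 :: r)[j]'(by omega) := List.getD_eq_getElem _ _ (by omega)
        have hlt : (b0 :: r)[j]'(by omega) < (b0 :: r)[j + 1] := hglt j (j + 1) (by omega) hi'
        have hb1 := hbd j (by omega)
        have hb2 := hbd (j + 1) hi'
        have hgq : (b0 :: r).getD (j + 1) 0 = r.getD j 0 := rfl
        rw [← hgq, hv1, hv0, modId _ _ (by omega) (by omega)]
        rw [← hv1, ← hv0, hgq]
        cases j with
        | zero => simp
        | succ m => simp


theorem pySetD_zero_cons {α : Type} (a : α) (l : List α) (v : α) :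
    PySem.List.pySetD (a :: l) 0 v = v :: l := by
  simp [PySem.List.pySetD, PySem.List.pySet?, PySem.List.pyIdx?]

theorem glast (cs : List Char) (hne : cs ≠ []) :
    gchr cs ((cs.length : Int) - 1) = cs.getLast hne := by
  have hn : 1 ≤ cs.length := List.length_pos_of_ne_nil hne
  have hcast : ((cs.length : Int) - 1) = ((cs.length - 1 : Nat) : Int) := by push_cast [hn]; ring
  rw [gchr, hcast, PySem.List.pyGetD_natCast, List.getD_eq_getElem _ _ (by omega),
    List.getLast_eq_getElem hne]

theorem ghead (cs : List Char) (hne : cs ≠ []) :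
    gchr cs 0 = cs[0]'(List.length_pos_of_ne_nil hne) := by
  rw [gchr, PySem.List.pyGetD_zero, List.getD_eq_getElem _ _ (List.length_pos_of_ne_nil hne)]

theorem cond_eq (cs : List Char) (hne : cs ≠ []) :
    (PySem.List.pyGet? cs 0 == PySem.List.pyGet? cs (-1))
      = decide (gchr cs ((cs.length : Int) - 1) = gchr cs 0) := by
  rw [PySem.List.pyGet?_neg_one, PySem.List.pyGet?_zero, List.getLast?_eq_some_getLast hne,
    List.getElem?_eq_getElem (List.length_pos_of_ne_nil hne), glast cs hne, ghead cs hne]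
  by_cases hx : cs.getLast hne = cs[0]'(List.length_pos_of_ne_nil hne)
  · simp [hx]
  · have hx2 : cs[0]'(List.length_pos_of_ne_nil hne) ≠ cs.getLast hne := fun e => hx e.symm
    simp [hx, hx2]

theorem key (cs : List Char) (hne : cs ≠ []) : solutionCore cs = solution_altCore cs := by
  have hn1 : 1 ≤ cs.length := List.length_pos_of_ne_nil hne
  have hc : ((cs.length : Int) - 1) = ((cs.length - 1 : Nat) : Int) := by omega
  have hBd : ∀ x ∈ lbd cs, (0 ≤ x ∧ x < (cs.length : Int) - 1) ∧ ¬ gchr cs x = gchr cs (x + 1) :=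
    fun x hx => (mem_lbdU cs _ x).1 hx
  have hPw : (lbd cs).Pairwise (· < ·) := pairwise_lbdU cs _
  simp only [solutionCore, solution_altCore]
  rw [hc, foldl_inv cs (cs.length - 1), ← hc]
  rw [show lbdU cs ((cs.length : Int) - 1) = lbd cs from rfl]
  rw [bnd_eq cs hne, cond_eq cs hne]
  dsimp only
  simp only [decide_eq_true_eq]
  by_cases hw : gchr cs ((cs.length : Int) - 1) = gchr cs 0
  · rw [if_pos hw, if_pos hw, List.append_nil]
    rcases hLc : lbd cs with _ | ⟨b0, r⟩
    · -- all characters equal: both sides give [len]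
      simp only [dfrom, List.getLast?_nil, Option.getD_none, List.nil_append]
      have e2 : PySem.List.pyGetD [(cs.length : Int) - 1 - -1] (-1) 0 = (cs.length : Int) - 1 - -1 := by
        rw [show ([(cs.length : Int) - 1 - -1] : List Int) = [] ++ [(cs.length : Int) - 1 - -1] from rfl,
          PySem.List.pyGetD_neg_one_append_singleton]
      rw [PySem.List.pyGetD_zero_cons, e2, pySetD_zero_cons, PySem.List.slice_to_neg_one]
      rw [show ([(cs.length : Int) - 1 - -1 + ((cs.length : Int) - 1 - -1)] : List Int).dropLast
          = [] from rfl]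
      rw [if_pos rfl, if_pos trivial, List.nil_append]
      apply PySem.List.sorted_eq_self_of_pairwise
      exact List.pairwise_singleton _ _
    · rw [hLc] at hBd hPw
      have hb0 := hBd b0 (by simp)
      rcases r with _ | ⟨b1, r2⟩
      · -- a single linear boundary cannot wrap: contradiction
        exfalso
        have g1 : gchr cs 0 = gchr cs b0 :=
          const_between cs 0 b0 le_rfl (by omega) (by omega)
            (fun i h1 h2 hm => by rw [hLc] at hm; simp at hm; omega)
        have g2 : gchr cs (b0 + 1) = gchr cs ((cs.length : Int) - 1) :=
          const_between cs (b0 + 1) ((cs.length : Int) - 1) (by omega) (by omega) (by omega)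
            (fun i h1 h2 hm => by rw [hLc] at hm; simp at hm; omega)
        exact hb0.2 ((g1.symm.trans hw.symm).trans g2.symm)
      · -- wrap case with at least two boundaries
        have hLlast : (b0 :: b1 :: r2).getLast? = some ((b0 :: b1 :: r2).getLast (by simp)) :=
          List.getLast?_eq_some_getLast (by simp)
        simp only [dfrom, List.cons_append, hLlast, Option.getD_some]
        rw [PySem.List.pyGetD_zero_cons]
        rw [show (b0 - -1) :: (b1 - b0) :: (dfrom b1 r2 ++
              [(cs.length : Int) - 1 - (b0 :: b1 :: r2).getLast (by simp)])
            = ((b0 - -1) :: (b1 - b0) :: dfrom b1 r2) ++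
              [(cs.length : Int) - 1 - (b0 :: b1 :: r2).getLast (by simp)] by simp]
        rw [PySem.List.pyGetD_neg_one_append_singleton]
        rw [show ((b0 - -1) :: (b1 - b0) :: dfrom b1 r2) ++
              [(cs.length : Int) - 1 - (b0 :: b1 :: r2).getLast (by simp)]
            = (b0 - -1) :: ((b1 - b0) :: dfrom b1 r2 ++
              [(cs.length : Int) - 1 - (b0 :: b1 :: r2).getLast (by simp)]) by simp]
        rw [pySetD_zero_cons, PySem.List.slice_to_neg_one]
        rw [show (b0 - -1 + ((cs.length : Int) - 1 - (b0 :: b1 :: r2).getLast (by simp))) ::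
              ((b1 - b0) :: dfrom b1 r2 ++
                [(cs.length : Int) - 1 - (b0 :: b1 :: r2).getLast (by simp)])
            = ((b0 - -1 + ((cs.length : Int) - 1 - (b0 :: b1 :: r2).getLast (by simp))) ::
              (b1 - b0) :: dfrom b1 r2) ++
              [(cs.length : Int) - 1 - (b0 :: b1 :: r2).getLast (by simp)] by simp]
        rw [List.dropLast_concat]
        rw [if_neg (by simp), if_neg (by simp)]
        rw [gaps_eq (cs.length : Int) (b0 :: b1 :: r2) (by simp) hPw
          (fun x hx => ⟨(hBd x hx).1.1, by have := (hBd x hx).1.2; omega⟩)]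
        simp only [List.getD_cons_zero, List.tail_cons, dfrom, hLlast, Option.getD_some]
        congr 1
        ring
  · rw [if_neg hw, if_neg hw]
    have hLne : lbd cs ≠ [] := by
      intro h0
      apply hw
      exact (const_between cs 0 ((cs.length : Int) - 1) le_rfl (by omega) le_rfl
        (fun i h1 h2 => by rw [h0]; simp)).symm
    rcases hLc : lbd cs with _ | ⟨b0, r⟩
    · exact absurd hLc hLne
    · rw [hLc] at hBd hPw
      rw [← dfrom_append_singleton]
      have hAne : dfrom (-1) ((b0 :: r) ++ [(cs.length : Int) - 1]) ≠ [] := by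
        apply List.ne_nil_of_length_pos
        rw [length_dfrom]
        simp
      rw [if_neg hAne, if_neg (by simp)]
      rw [gaps_eq (cs.length : Int) ((b0 :: r) ++ [(cs.length : Int) - 1])
        (by simp)
        (List.pairwise_append.mpr ⟨hPw, by simp,
          fun x hx y hy => by simp at hy; subst hy; exact (hBd x hx).1.2⟩)
        (fun x hx => by
          rcases List.mem_append.mp hx with h | h
          · have := (hBd x h).1; omega
          · simp at h; omega)]
      rw [List.getLast?_concat]
      simp only [List.cons_append, List.getD_cons_zero, List.tail_cons, Option.getD_some, dfrom]
      congr 1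
      ring

theorem key_str (s : String) (hpre : s ≠ "") : solution s = solution_alt s := by
  apply key
  intro h
  apply hpre
  exact String.toList_inj.mp (by rw [h]; rfl)


-- ===== VERDICT (by name: the statement is the Claim_ definition above) =====
theorem solution_spec : Claim_equal_solution := by
  intro s _ hpre
  unfold Spec_solution
  exact key_str s hpre
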